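-- pv_equiv track=rewrite | github.com/trekie86/AdventOfCode2020 | day16/part_1.py | evaluate_ticket
-- ===== SOURCE A (Python) =====
-- def evaluate_ticket(condition_list, ticket_values):
--     error_vals = []
--     for ticket in ticket_values:
--         condition_met = False
--         for condition in condition_list:
--             if ticket in condition:
--                 condition_met = True
--                 break
--         if not condition_met:
--             error_vals.append(ticket)
--     return error_vals
-- ===== SOURCE B (Python) =====
-- def evaluate_ticket(condition_list, ticket_values):
--     valid = set()
--     for condition in condition_list:
--         valid.update(condition)
--     return [t for t in ticket_values if t not in valid]
-- ===== Notes on version B (the rewrite author's own statement) =====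
-- stated objective: faster
-- what changed: B builds a hash set of all condition values once and filters tickets by a single membership test, replacing A's nested scan of every condition list per ticket.
import Mathlib
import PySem

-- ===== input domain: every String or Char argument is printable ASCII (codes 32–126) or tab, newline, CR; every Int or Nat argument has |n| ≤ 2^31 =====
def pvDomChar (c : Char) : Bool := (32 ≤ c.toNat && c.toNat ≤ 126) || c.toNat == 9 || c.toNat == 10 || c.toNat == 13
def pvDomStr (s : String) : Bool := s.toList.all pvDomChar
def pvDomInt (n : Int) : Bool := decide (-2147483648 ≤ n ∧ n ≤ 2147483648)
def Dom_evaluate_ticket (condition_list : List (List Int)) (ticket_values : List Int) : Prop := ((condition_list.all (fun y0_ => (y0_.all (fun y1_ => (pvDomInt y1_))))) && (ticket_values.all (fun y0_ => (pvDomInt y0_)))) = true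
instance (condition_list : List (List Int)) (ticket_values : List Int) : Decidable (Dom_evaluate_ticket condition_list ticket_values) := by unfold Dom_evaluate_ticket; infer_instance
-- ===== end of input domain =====

-- B builds a set of all condition values once and filters tickets by one membership test (faster: O(T+C) vs A's O(T*C)).
-- ===== PORT A =====
def evaluate_ticket (condition_list : List (List Int)) (ticket_values : List Int) : List Int :=
  ticket_values.foldl (fun error_vals ticket =>
    -- inner loop with break: condition_met stays true once set
    let condition_met := condition_list.foldl (fun b condition =>
      if b then b else condition.contains ticket) false
    if !condition_met then error_vals ++ [ticket] else error_vals) []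

-- ===== PORT B =====
def evaluate_ticket_alt (condition_list : List (List Int)) (ticket_values : List Int) : List Int :=
  let valid : PySem.Set Int :=
    condition_list.foldl (fun s condition => PySem.Set.update s condition) PySem.Set.empty
  ticket_values.filter (fun t => !(PySem.Set.contains valid t))

-- ===== PRECONDITION & SPEC =====
def Spec_evaluate_ticket (condition_list : List (List Int)) (ticket_values : List Int) (out : List Int) : Prop := out = evaluate_ticket_alt condition_list ticket_values
instance (condition_list : List (List Int)) (ticket_values : List Int) (out : List Int) : Decidable (Spec_evaluate_ticket condition_list ticket_values out) := by unfold Spec_evaluate_ticket; infer_instance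

-- ===== CLAIM (what is proved, stated in full; the proofs are below) =====
def Claim_equal_evaluate_ticket : Prop := ∀ (condition_list : List (List Int)) (ticket_values : List Int), Dom_evaluate_ticket condition_list ticket_values → Spec_evaluate_ticket condition_list ticket_values (evaluate_ticket condition_list ticket_values)

-- ===== LEMMAS AND PROOFS =====

-- ===== VERDICT (by name: the statement is the Claim_ definition above) =====
-- the inner break-loop computes "some condition contains the ticket"
-- once condition_met is true the inner loop keeps it true (Python's break)
lemma acc_true (cl : List (List Int)) (t : Int) :
    cl.foldl (fun b condition => if b then b else condition.contains t) true = true := by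
  induction cl with
  | nil => rfl
  | cons c cs ih => simpa using ih

lemma met_eq_any (cl : List (List Int)) (t : Int) :
    cl.foldl (fun b condition => if b then b else condition.contains t) false
      = cl.any (fun c => c.contains t) := by
  induction cl with
  | nil => rfl
  | cons c cs ih =>
    simp only [List.foldl_cons, List.any_cons]
    have e : (if (false : Bool) = true then (false : Bool) else c.contains t) = c.contains t := rfl
    rw [e]
    cases h : c.contains t
    · rw [Bool.false_or]; exact ih
    · rw [Bool.true_or]; exact acc_true cs t

-- membership in B's accumulated set
lemma mem_valid (cl : List (List Int)) (s : PySem.Set Int) (t : Int) :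
    t ∈ cl.foldl (fun s condition => PySem.Set.update s condition) s
      ↔ t ∈ s ∨ ∃ c ∈ cl, t ∈ c := by
  induction cl generalizing s with
  | nil => simp
  | cons c cs ih =>
    simp [List.foldl_cons, ih, PySem.Set.mem_update]
    tauto

theorem evaluate_ticket_spec : Claim_equal_evaluate_ticket := by
  intro cl tv _
  unfold Spec_evaluate_ticket evaluate_ticket evaluate_ticket_alt
  rw [PySem.List.foldl_append_if]
  simp only [List.nil_append, List.map_id']
  apply List.filter_congr
  intro t _
  have h1 := met_eq_any cl t
  rw [h1]
  congr 1
  rw [Bool.eq_iff_iff, PySem.Set.contains_iff, mem_valid, List.any_eq_true]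
  simp
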